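-- pv_equiv track=rewrite | github.com/mosdragon/deep_learning | word2vec.py | preproc_line
-- ===== SOURCE A (Python) =====
-- def preproc_line(line):
--     """
--     This is how each entry of the corpus will be preprocessed.
--     - Remove whitespaces and newlines
--     - Lowercase everything
--     - Apostrophes replaced with spaces
--     - All other punctuation replaced with spaces
--     """
--     line = line.strip().lower()
--
--     # Replace apostrophes with empty spaces to handle words like "can't"
--     line = line.replace("'", "")
--
--     punctuations = [",", "-", "_", ".", "!", '"',
--                    "[", "]", ";", ":", "(", ")",
--                     "+", "{", "}", "?", "/", "\\"
--                    ]
--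
--     # Replace all punctuations with spaces.
--     for punc in punctuations:
--         line = line.replace(punc, " ")
--
--     # Split line by spaces.
--     words = line.split()
--     # Special case: Remove empty strings.
--     words = [w for w in words if w != ""]
--
--     return words
-- ===== SOURCE B (Python) =====
-- SEPARATORS = set(",-_.!\"[];:(){}+?/\\")
--
-- def preproc_line(line):
--     words = []
--     buf = []
--     for c in line:
--         if c == "'":
--             continue  # apostrophes are deleted, joining the parts
--         if c in SEPARATORS or c.isspace():
--             if buf:
--                 words.append("".join(buf))
--                 buf = []
--         else:
--             buf.append(c.lower())
--     if buf:
--         words.append("".join(buf))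
--     return words
-- ===== Notes on version B (the rewrite author's own statement) =====
-- stated objective: alternative
-- what changed: Replaced A's transform-then-split pipeline (strip, lower, delete apostrophes, 18 successive replace passes, then split) with a single left-to-right character scan that deletes apostrophes, flushes the current token buffer at separators (the 18 punctuation chars or whitespace) and otherwise appends the lowercased char.
import Mathlib
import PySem

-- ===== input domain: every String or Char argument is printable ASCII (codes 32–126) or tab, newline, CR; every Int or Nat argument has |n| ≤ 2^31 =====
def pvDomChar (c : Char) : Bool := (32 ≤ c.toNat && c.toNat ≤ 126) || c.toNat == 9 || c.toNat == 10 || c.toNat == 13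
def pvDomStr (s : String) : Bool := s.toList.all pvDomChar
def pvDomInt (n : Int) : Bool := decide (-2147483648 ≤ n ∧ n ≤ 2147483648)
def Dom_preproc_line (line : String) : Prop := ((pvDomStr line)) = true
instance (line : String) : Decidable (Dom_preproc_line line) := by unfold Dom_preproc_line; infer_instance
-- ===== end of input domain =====

-- B replaces A's transform-then-split pipeline (strip/lower/delete-apostrophes/18 replace passes/split)
-- by a single left-to-right character scan that builds the tokens directly (alternative decomposition; no speed claim).

-- ===== PORT A =====
def preproc_line (line : String) : List String :=
  let line1 := PySem.Str.lower (PySem.Str.strip line)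
  let line2 := PySem.Str.replace line1 "'" ""
  let punctuations : List String := [",", "-", "_", ".", "!", "\"",
                                     "[", "]", ";", ":", "(", ")",
                                     "+", "{", "}", "?", "/", "\\"]
  let line3 := List.foldl (fun l punc => PySem.Str.replace l punc " ") line2 punctuations
  let words := PySem.Str.split₀ line3
  let words2 := words.filter (fun w => w != "")
  words2

-- ===== PORT B =====
def pvSeps : List Char := [',', '-', '_', '.', '!', '"', '[', ']', ';', ':', '(', ')', '+', '{', '}', '?', '/', '\\']

-- replace.go with single-char old

def pvStep (st : List String × List Char) (c : Char) : List String × List Char :=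
  if c = '\'' then st
  else if pvSeps.contains c || PySem.Chars.isspace c then
    (if st.2.isEmpty then st else (st.1 ++ [String.ofList st.2], []))
  else (st.1, st.2 ++ [PySem.Chars.lowerChar c])

def preproc_line_alt (line : String) : List String :=
  let fin := line.toList.foldl pvStep ([], [])
  if fin.2.isEmpty then fin.1 else fin.1 ++ [String.ofList fin.2]

-- ===== PRECONDITION & SPEC =====
def Spec_preproc_line (line : String) (out : List String) : Prop := out = preproc_line_alt line
instance (line : String) (out : List String) : Decidable (Spec_preproc_line line out) := by unfold Spec_preproc_line; infer_instance

-- ===== CLAIM (what is proved, stated in full; the proofs are below) =====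
def Claim_equal_preproc_line : Prop := ∀ (line : String), Dom_preproc_line line → Spec_preproc_line line (preproc_line line)

-- ===== LEMMAS AND PROOFS =====

theorem replace_go_single (p : Char) (new : List Char) :
    ∀ (fuel : Nat) (l acc : List Char), l.length ≤ fuel →
      PySem.Chars.replace.go [p] new fuel l acc
        = acc.reverse ++ l.flatMap (fun c => if c = p then new else [c]) := by
  intro fuel
  induction fuel with
  | zero => intro l acc h; cases l with
    | nil => simp [PySem.Chars.replace.go]
    | cons c t => simp at h
  | succ n ih =>
    intro l acc h
    cases l with
    | nil => simp [PySem.Chars.replace.go]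
    | cons c t =>
      by_cases hc : c = p
      · subst hc
        simp [PySem.Chars.replace.go, List.isPrefixOf, ih t _ (by simpa using h)]
      · simp [PySem.Chars.replace.go, List.isPrefixOf, Ne.symm hc, hc, ih t _ (by simpa using h)]

theorem replace_single (p : Char) (new l : List Char) :
    PySem.Chars.replace l [p] new = l.flatMap (fun c => if c = p then new else [c]) := by
  simp [PySem.Chars.replace, replace_go_single p new l.length l [] le_rfl]

theorem replace_del (l : List Char) :
    PySem.Chars.replace l ['\''] [] = l.filter (fun c => c != '\'') := by
  rw [replace_single]
  induction l with
  | nil => rfl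
  | cons c t ih => by_cases h : c = '\'' <;> simp [h, ih]

theorem replace_sub (p : Char) (l : List Char) :
    PySem.Chars.replace l [p] [' '] = l.map (fun c => if c = p then ' ' else c) := by
  rw [replace_single]
  induction l with
  | nil => rfl
  | cons c t ih => by_cases h : c = p <;> simp [h, ih]


theorem foldl_sub :
    ∀ (ps : List Char), ' ' ∉ ps → ∀ l : List Char,
      List.foldl (fun l p => PySem.Chars.replace l [p] [' ']) l ps
        = l.map (fun c => if c ∈ ps then ' ' else c) := by
  intro ps
  induction ps with
  | nil => intro _ l; simp
  | cons p ps ih =>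
    intro hsp l
    have hsp' : ' ' ∉ ps := fun h => hsp (List.mem_cons_of_mem _ h)
    rw [List.foldl_cons, replace_sub, ih hsp', List.map_map]
    refine List.map_congr_left (fun c _ => ?_)
    by_cases hc : c = p
    · subst hc; simp [hsp']
    · by_cases hm : c ∈ ps <;> simp [hc, hm]

-- char-level facts
theorem toNat_of_upper (c : Char) (h : PySem.Chars.isupper c = true) :
    65 ≤ c.toNat ∧ c.toNat ≤ 90 := by
  simp [PySem.Chars.isupper, Char.le_def, UInt32.le_iff_toNat_le] at h
  exact h

theorem notspace_of_range (c : Char) (h1 : 33 ≤ c.toNat) (h2 : c.toNat ≤ 126) :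
    PySem.Chars.isspace c = false := by
  simp [PySem.Chars.isspace]
  omega

theorem toNat_lowered (c : Char) (h : PySem.Chars.isupper c = true) :
    (PySem.Chars.lowerChar c).toNat = c.toNat + 32 := by
  obtain ⟨h1, h2⟩ := toNat_of_upper c h
  simp [PySem.Chars.lowerChar, h]
  rw [Char.toNat_ofNat, if_pos]
  exact Or.inl (by omega)

theorem mem_seps_toNat (c : Char) (h : c ∈ pvSeps) :
    c.toNat ≤ 95 ∨ c.toNat = 123 ∨ c.toNat = 125 := by
  fin_cases h <;> simp

theorem notseps_of_range (c : Char) (h1 : 97 ≤ c.toNat) (h2 : c.toNat ≤ 122) :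
    c ∉ pvSeps := by
  intro h
  rcases mem_seps_toNat c h with h3 | h3 | h3 <;> omega

theorem lowerChar_apos (c : Char) (h : c ≠ '\'') : PySem.Chars.lowerChar c ≠ '\'' := by
  by_cases hu : PySem.Chars.isupper c = true
  · intro he
    have := toNat_lowered c hu
    rw [he] at this
    have h2 := toNat_of_upper c hu
    have h3 : (39 : Nat) = c.toNat + 32 := this
    omega
  · simpa [PySem.Chars.lowerChar, hu] using h

theorem sep_char (c : Char) (h : (pvSeps.contains c || PySem.Chars.isspace c) = true) :
    PySem.Chars.isspace (if PySem.Chars.lowerChar c ∈ pvSeps then ' ' else PySem.Chars.lowerChar c) = true := by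
  rcases Bool.or_eq_true_iff.mp h with h | h
  · have hm : c ∈ pvSeps := by simpa using h
    fin_cases hm <;> decide
  · have hu : PySem.Chars.isupper c = false := by
      by_contra hx
      have hb : PySem.Chars.isupper c = true := by simpa using hx
      obtain ⟨h1, h2⟩ := toNat_of_upper c hb
      rw [notspace_of_range c (by omega) (by omega)] at h
      exact Bool.false_ne_true h
    rw [show PySem.Chars.lowerChar c = c from by simp [PySem.Chars.lowerChar, hu]]
    by_cases hm : c ∈ pvSeps
    · rw [if_pos hm]; decide
    · rw [if_neg hm]; exact h

theorem nonsep_char (c : Char) (h : (pvSeps.contains c || PySem.Chars.isspace c) = false) :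
    (if PySem.Chars.lowerChar c ∈ pvSeps then ' ' else PySem.Chars.lowerChar c) = PySem.Chars.lowerChar c
      ∧ PySem.Chars.isspace (PySem.Chars.lowerChar c) = false := by
  rw [Bool.or_eq_false_iff] at h
  obtain ⟨hs, hw⟩ := h
  by_cases hu : PySem.Chars.isupper c = true
  · obtain ⟨h1, h2⟩ := toNat_of_upper c hu
    have ht := toNat_lowered c hu
    constructor
    · rw [if_neg (notseps_of_range _ (by omega) (by omega))]
    · exact notspace_of_range _ (by omega) (by omega)
  · have he : PySem.Chars.lowerChar c = c := by simp [PySem.Chars.lowerChar, hu]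
    rw [he]
    exact ⟨by rw [if_neg (by simpa using hs)], hw⟩

-- split₀.go equations
theorem split_go_nil (cur : List Char) (acc : List (List Char)) :
    PySem.Chars.split₀.go [] cur acc
      = if cur.isEmpty then acc.reverse else (cur.reverse :: acc).reverse := by
  simp [PySem.Chars.split₀.go]

theorem split_go_space (c : Char) (rest cur : List Char) (acc : List (List Char))
    (h : PySem.Chars.isspace c = true) :
    PySem.Chars.split₀.go (c :: rest) cur acc
      = if cur.isEmpty then PySem.Chars.split₀.go rest [] acc
        else PySem.Chars.split₀.go rest [] (cur.reverse :: acc) := by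
  simp [PySem.Chars.split₀.go, h]

theorem split_go_char (c : Char) (rest cur : List Char) (acc : List (List Char))
    (h : PySem.Chars.isspace c = false) :
    PySem.Chars.split₀.go (c :: rest) cur acc
      = PySem.Chars.split₀.go rest (c :: cur) acc := by
  simp [PySem.Chars.split₀.go, h]

def pvFinish (st : List String × List Char) : List String :=
  if st.2.isEmpty then st.1 else st.1 ++ [String.ofList st.2]

def pvT (l : List Char) : List Char :=
  ((l.map PySem.Chars.lowerChar).filter (fun c => c != '\'')).map
    (fun c => if c ∈ pvSeps then ' ' else c)

theorem pvT_apos (l : List Char) : pvT ('\'' :: l) = pvT l := by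
  simp [pvT, show PySem.Chars.lowerChar '\'' = '\'' from by decide]

theorem pvT_cons (c : Char) (l : List Char) (h : c ≠ '\'') :
    pvT (c :: l)
      = (if PySem.Chars.lowerChar c ∈ pvSeps then ' ' else PySem.Chars.lowerChar c) :: pvT l := by
  simp [pvT, lowerChar_apos c h]

theorem main_go :
    ∀ (l buf : List Char) (ws : List String),
      List.map String.ofList
          (PySem.Chars.split₀.go (pvT l) buf.reverse ((ws.map String.toList).reverse))
        = pvFinish (List.foldl pvStep (ws, buf) l) := by
  intro l
  induction l with
  | nil =>
    intro buf ws
    cases buf with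
    | nil =>
      simp [pvT, split_go_nil, pvFinish]
      calc List.map (String.ofList ∘ String.toList) ws
          = List.map id ws := List.map_congr_left fun a _ => String.ofList_toList
        _ = ws := List.map_id ws
    | cons b t =>
      simp [pvT, split_go_nil, pvFinish]
      calc List.map (String.ofList ∘ String.toList) ws
          = List.map id ws := List.map_congr_left fun a _ => String.ofList_toList
        _ = ws := List.map_id ws
  | cons c l ih =>
    intro buf ws
    by_cases hc : c = '\''
    · subst hc
      rw [pvT_apos, List.foldl_cons, show pvStep (ws, buf) '\'' = (ws, buf) from by simp [pvStep]]
      exact ih buf ws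
    · rw [pvT_cons c l hc]
      cases hsep : (pvSeps.contains c || PySem.Chars.isspace c) with
      | true =>
        rw [split_go_space _ _ _ _ (sep_char c hsep)]
        cases buf with
        | nil =>
          rw [List.foldl_cons, show pvStep (ws, []) c = (ws, []) from by unfold pvStep; rw [if_neg hc, if_pos hsep]; rfl]
          simpa using ih [] ws
        | cons b t =>
          rw [List.foldl_cons,
            show pvStep (ws, b :: t) c = (ws ++ [String.ofList (b :: t)], []) from by
              unfold pvStep; rw [if_neg hc, if_pos hsep]; rfl]
          have := ih [] (ws ++ [String.ofList (b :: t)])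
          simp only [List.map_append, List.map_cons, List.map_nil, List.reverse_append,
            String.toList_ofList, List.reverse_nil] at this ⊢
          simpa using this
      | false =>
        obtain ⟨h1, h2⟩ := nonsep_char c hsep
        rw [h1, split_go_char _ _ _ _ h2, List.foldl_cons,
          show pvStep (ws, buf) c = (ws, buf ++ [PySem.Chars.lowerChar c]) from by
            unfold pvStep; rw [if_neg hc, if_neg (by simp [Bool.or_eq_false_iff] at hsep; simp [hsep.1, hsep.2])]]
        have := ih (buf ++ [PySem.Chars.lowerChar c]) ws
        simpa using this

-- split₀ produces no empty words
theorem split_go_ne_nil :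
    ∀ (l cur : List Char) (acc : List (List Char)), (∀ a ∈ acc, a ≠ ([] : List Char)) →
      ∀ w ∈ PySem.Chars.split₀.go l cur acc, w ≠ [] := by
  intro l
  induction l with
  | nil =>
    intro cur acc hacc w hw
    rw [split_go_nil] at hw
    by_cases hcur : cur.isEmpty
    · rw [if_pos hcur] at hw
      exact hacc w (List.mem_reverse.mp hw)
    · rw [if_neg hcur] at hw
      rcases List.mem_cons.mp (List.mem_reverse.mp hw) with h | h
      · subst h; simp_all
      · exact hacc w h
  | cons c rest ih =>
    intro cur acc hacc w hw
    cases hsp : PySem.Chars.isspace c with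
    | true =>
      rw [split_go_space _ _ _ _ hsp] at hw
      by_cases hcur : cur.isEmpty
      · rw [if_pos hcur] at hw; exact ih [] acc hacc w hw
      · rw [if_neg hcur] at hw
        refine ih [] (cur.reverse :: acc) ?_ w hw
        intro a ha
        rcases List.mem_cons.mp ha with h | h
        · simp_all
        · exact hacc a h
    | false =>
      rw [split_go_char _ _ _ _ hsp] at hw
      exact ih (c :: cur) acc hacc w hw

-- leading whitespace is ignored by the scan (empty buffer)
theorem scan_lstrip (ws : List String) :
    ∀ l : List Char,
      List.foldl pvStep (ws, ([] : List Char)) (l.dropWhile PySem.Chars.isspace)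
        = List.foldl pvStep (ws, []) l := by
  intro l
  induction l with
  | nil => rfl
  | cons c t ih =>
    cases hsp : PySem.Chars.isspace c with
    | true =>
      have hc : c ≠ '\'' := by
        intro h; subst h; exact absurd hsp (by decide)
      rw [List.dropWhile_cons_of_pos (by simp [hsp]), ih, List.foldl_cons,
        show pvStep (ws, []) c = (ws, []) from by
          unfold pvStep; rw [if_neg hc, if_pos (by simp [hsp])]; rfl]
    | false => rw [List.dropWhile_cons_of_neg (by simp [hsp])]

-- trailing whitespace does not change the finished scan
theorem finish_ws :
    ∀ (t : List Char), (∀ c ∈ t, PySem.Chars.isspace c = true) →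
      ∀ st : List String × List Char, pvFinish (List.foldl pvStep st t) = pvFinish st := by
  intro t
  induction t with
  | nil => intro _ st; rfl
  | cons c t ih =>
    intro h st
    have hsp : PySem.Chars.isspace c = true := h c (by simp)
    have hc : c ≠ '\'' := by
      intro hx; subst hx; exact absurd hsp (by decide)
    have ht : ∀ c ∈ t, PySem.Chars.isspace c = true := fun c hm => h c (List.mem_cons_of_mem _ hm)
    rw [List.foldl_cons,
      show pvStep st c = (if st.2.isEmpty then st else (st.1 ++ [String.ofList st.2], [])) from by
        unfold pvStep; rw [if_neg hc, if_pos (by simp [hsp])]]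
    by_cases hb : st.2.isEmpty
    · rw [if_pos hb, ih ht st]
    · rw [if_neg hb, ih ht]
      simp [pvFinish, hb]

-- the scan of the stripped string finishes like the scan of the whole string
theorem scan_strip (l : List Char) :
    pvFinish (List.foldl pvStep (([] : List String), ([] : List Char)) (PySem.Chars.strip l))
      = pvFinish (List.foldl pvStep ([], []) l) := by
  unfold PySem.Chars.strip PySem.Chars.rstrip PySem.Chars.lstrip
  set m := l.dropWhile PySem.Chars.isspace with hm
  have hdec : m = (m.reverse.dropWhile PySem.Chars.isspace).reverse
      ++ (m.reverse.takeWhile PySem.Chars.isspace).reverse := by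
    rw [← List.reverse_append, List.takeWhile_append_dropWhile, List.reverse_reverse]
  calc pvFinish (List.foldl pvStep ([], []) (m.reverse.dropWhile PySem.Chars.isspace).reverse)
      = pvFinish (List.foldl pvStep
          (List.foldl pvStep ([], []) (m.reverse.dropWhile PySem.Chars.isspace).reverse)
          (m.reverse.takeWhile PySem.Chars.isspace).reverse) := by
        rw [finish_ws _ (fun c hc => List.mem_takeWhile_imp (List.mem_reverse.mp hc)) _]
    _ = pvFinish (List.foldl pvStep ([], []) m) := by rw [← List.foldl_append, ← hdec]
    _ = pvFinish (List.foldl pvStep ([], []) l) := by rw [hm, scan_lstrip]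

-- string-level foldl of replaces, reduced to the char level
theorem foldl_str :
    ∀ (ps : List Char) (s : String),
      (List.foldl (fun l p => PySem.Str.replace l p " ") s
          (ps.map (fun c => String.ofList [c]))).toList
        = List.foldl (fun l p => PySem.Chars.replace l [p] [' ']) s.toList ps := by
  intro ps
  induction ps with
  | nil => intro s; rfl
  | cons p ps ih =>
    intro s
    rw [List.map_cons, List.foldl_cons, List.foldl_cons, ih,
      PySem.Str.toList_replace, String.toList_ofList,
      show (" " : String).toList = [' '] from rfl]

theorem assembled (line : String) : preproc_line line = preproc_line_alt line := by
  unfold preproc_line preproc_line_alt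
  simp only []
  have hpuncts : ([",", "-", "_", ".", "!", "\"", "[", "]", ";", ":", "(", ")",
      "+", "{", "}", "?", "/", "\\"] : List String)
      = pvSeps.map (fun c => String.ofList [c]) := by decide
  -- the char list fed to split₀ is pvT of the stripped input
  have h3 : (List.foldl (fun l punc => PySem.Str.replace l punc " ")
        (PySem.Str.replace (PySem.Str.lower (PySem.Str.strip line)) "'" "")
        [",", "-", "_", ".", "!", "\"", "[", "]", ";", ":", "(", ")",
         "+", "{", "}", "?", "/", "\\"]).toList
      = pvT (PySem.Chars.strip line.toList) := by
    rw [hpuncts, foldl_str, PySem.Str.toList_replace, PySem.Str.toList_lower,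
      PySem.Str.toList_strip]
    rw [show ("'" : String).toList = ['\''] from rfl, show ("" : String).toList = [] from rfl]
    rw [replace_del, foldl_sub pvSeps (by decide)]
    rfl
  rw [show PySem.Str.split₀ (List.foldl (fun l punc => PySem.Str.replace l punc " ")
        (PySem.Str.replace (PySem.Str.lower (PySem.Str.strip line)) "'" "")
        [",", "-", "_", ".", "!", "\"", "[", "]", ";", ":", "(", ")",
         "+", "{", "}", "?", "/", "\\"])
      = List.map String.ofList (PySem.Chars.split₀ (pvT (PySem.Chars.strip line.toList))) from by
    unfold PySem.Str.split₀; rw [h3]]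
  -- no empty words, so the filter is the identity
  have hne := split_go_ne_nil (pvT (PySem.Chars.strip line.toList)) [] []
    (by intro a ha; simp at ha)
  rw [List.filter_eq_self.mpr ?_]
  · -- main equivalence
    have := main_go (PySem.Chars.strip line.toList) [] []
    simp only [List.reverse_nil, List.map_nil] at this
    unfold PySem.Chars.split₀ at *
    rw [this, scan_strip]
    rfl
  · intro w hw
    rcases List.mem_map.mp hw with ⟨a, ha, rfl⟩
    have : a ≠ [] := hne a (by unfold PySem.Chars.split₀ at *; exact ha)
    simp only [bne_iff_ne, ne_eq]
    intro hx
    exact this (by rw [← String.toList_ofList (l := a), hx]; rfl)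

-- ===== VERDICT (by name: the statement is the Claim_ definition above) =====
theorem preproc_line_spec : Claim_equal_preproc_line := by
  intro line _
  unfold Spec_preproc_line
  exact assembled line
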